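-- pv_equiv track=rewrite | github.com/Stoa-Medical/fhir-x-synthea_csv | fhir_x_synthea/synthea_csv_lib.py | extract_coding_code
-- ===== SOURCE A (Python) =====
-- from typing import Any
--
-- def extract_coding_code(
--     codeable_concept: dict[str, Any] | None,
--     preferred_system: str | None = None,
--     preferred_systems: list[str] | None = None,
-- ) -> str:
--     """
--     Extract a coding code from a FHIR CodeableConcept.
--
--     Args:
--         codeable_concept: FHIR CodeableConcept dictionary
--         preferred_system: Single preferred coding system URL (deprecated, use preferred_systems)
--         preferred_systems: List of preferred coding system URLs (tried in order)
--
--     Returns: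
--         Coding code string, or empty string if not found
--     """
--     if not codeable_concept:
--         return ""
--     codings = codeable_concept.get("coding", [])
--     if not codings:
--         return ""
--
--     # Handle preferred_systems list (newer API)
--     if preferred_systems:
--         for system in preferred_systems:
--             for coding in codings:
--                 if coding.get("system") == system:
--                     code = coding.get("code", "")
--                     if code:
--                         return code
--
--     # Handle single preferred_system (legacy API)
--     if preferred_system:
--         for coding in codings:
--             if coding.get("system") == preferred_system:
--                 code = coding.get("code", "")
--                 if code:
--                     return code
--
--     # Fallback to first coding
--     first_code = codings[0].get("code", "")
--     return first_code if first_code else ""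
-- ===== SOURCE B (Python) =====
-- def extract_coding_code(codeable_concept, preferred_system=None, preferred_systems=None):
--     if not codeable_concept:
--         return ""
--     codings = codeable_concept.get("coding", [])
--     if not codings:
--         return ""
--
--     # Rank every acceptable system: position in preferred_systems, then the
--     # legacy preferred_system appended at the end (first occurrence wins).
--     prefs = list(preferred_systems or [])
--     if preferred_system:
--         prefs.append(preferred_system)
--     rank = {}
--     for i, s in enumerate(prefs):
--         rank.setdefault(s, i)
--
--     # Single pass: keep the best-ranked coding with a non-empty code.
--     best = None  # (rank, code); strict '<' keeps the earliest coding per rank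
--     for coding in codings:
--         code = coding.get("code", "")
--         r = rank.get(coding.get("system"))
--         if code and r is not None and (best is None or r < best[0]):
--             best = (r, code)
--
--     if best is not None:
--         return best[1]
--     return codings[0].get("code", "")
-- ===== Notes on version B (the rewrite author's own statement) =====
-- stated objective: alternative
-- what changed: Replaces A's staged nested searches (scan codings once per preferred system, then for the legacy system) with a rank table over all acceptable systems plus a single min-selection pass over the codings keeping the best (rank, code) pair.
import Mathlib
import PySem

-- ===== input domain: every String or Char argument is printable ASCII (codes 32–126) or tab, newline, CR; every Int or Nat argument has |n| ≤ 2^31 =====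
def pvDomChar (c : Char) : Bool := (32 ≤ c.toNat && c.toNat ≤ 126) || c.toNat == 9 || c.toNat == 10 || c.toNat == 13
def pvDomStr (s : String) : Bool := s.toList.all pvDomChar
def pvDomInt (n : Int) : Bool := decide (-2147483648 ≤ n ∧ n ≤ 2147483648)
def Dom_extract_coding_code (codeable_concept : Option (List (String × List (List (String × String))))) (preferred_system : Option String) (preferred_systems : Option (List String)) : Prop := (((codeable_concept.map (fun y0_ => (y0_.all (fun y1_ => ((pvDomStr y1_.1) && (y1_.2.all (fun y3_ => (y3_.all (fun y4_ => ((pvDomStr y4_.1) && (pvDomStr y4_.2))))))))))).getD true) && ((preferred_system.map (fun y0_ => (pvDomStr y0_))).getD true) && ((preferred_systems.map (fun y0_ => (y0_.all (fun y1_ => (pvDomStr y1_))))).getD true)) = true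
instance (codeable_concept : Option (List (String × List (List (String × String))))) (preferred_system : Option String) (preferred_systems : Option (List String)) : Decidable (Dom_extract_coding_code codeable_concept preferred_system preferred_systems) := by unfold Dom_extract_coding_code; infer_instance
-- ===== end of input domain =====

-- B replaces A's staged nested searches with a rank table over the acceptable
-- systems plus one min-selection pass over the codings (objective: alternative).

-- ===== PORT A =====
-- coding.get(k) / coding.get(k, d) on a coding dict
def pvCget? (c : List (String × String)) (k : String) : Option String := (PySem.Dict.mk c).get? k
def pvCgetD (c : List (String × String)) (k : String) (d : String) : String := (PySem.Dict.mk c).getD k d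

-- A's inner loop: for coding in codings: if coding.get("system") == s: code = coding.get("code",""); if code: return code
def pvScanA (s : String) : List (List (String × String)) → Option String
  | [] => none
  | c :: rest =>
    if pvCget? c "system" = some s then
      let code := pvCgetD c "code" ""
      if code ≠ "" then some code else pvScanA s rest
    else pvScanA s rest

-- A's outer loop over preferred_systems
def pvLoopA (codings : List (List (String × String))) : List String → Option String
  | [] => none
  | s :: rest =>
    match pvScanA s codings with
    | some code => some code
    | none => pvLoopA codings rest

-- A's body after the two empty guards
def pvBodyA (codings : List (List (String × String))) (preferred_system : Option String) (preferred_systems : Option (List String)) : String :=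
  match codings with
  | [] => ""
  | c0 :: _ =>
    let r1 : Option String :=
      match preferred_systems with
      | some systems => if systems ≠ [] then pvLoopA codings systems else none
      | none => none
    match r1 with
    | some code => code
    | none =>
      let r2 : Option String :=
        match preferred_system with
        | some s => if s ≠ "" then pvScanA s codings else none
        | none => none
      match r2 with
      | some code => code
      | none =>
        let first_code := pvCgetD c0 "code" ""
        if first_code ≠ "" then first_code else ""

def extract_coding_code (codeable_concept : Option (List (String × List (List (String × String))))) (preferred_system : Option String) (preferred_systems : Option (List String)) : String :=
  match codeable_concept with
  | none => ""
  | some d =>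
    if d.isEmpty then ""
    else pvBodyA ((PySem.Dict.mk d).getD "coding" []) preferred_system preferred_systems

-- ===== PORT B =====
-- prefs = list(preferred_systems or []); if preferred_system: prefs.append(preferred_system)
def pvPrefs (preferred_system : Option String) (preferred_systems : Option (List String)) : List String :=
  preferred_systems.getD [] ++
    (match preferred_system with
     | some s => if s ≠ "" then [s] else []
     | none => [])

-- for i, s in enumerate(prefs): rank.setdefault(s, i)
def pvRankAux : List String → Nat → PySem.Dict (Option String) Nat → PySem.Dict (Option String) Nat
  | [], _, d => d
  | s :: rest, i, d => pvRankAux rest (i + 1) (d.setdefault (some s) i)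

-- the single selection pass: best = None; for coding in codings: …
def pvBest (rank : PySem.Dict (Option String) Nat) : List (List (String × String)) → Option (Nat × String) → Option (Nat × String)
  | [], best => best
  | c :: rest, best =>
    let code := pvCgetD c "code" ""
    let r := rank.get? (pvCget? c "system")
    let best' :=
      if code ≠ "" then
        match r with
        | some rv =>
          match best with
          | none => some (rv, code)
          | some b => if rv < b.1 then some (rv, code) else best
        | none => best
      else best
    pvBest rank rest best'

-- B's body after the two empty guards
def pvBodyB (codings : List (List (String × String))) (preferred_system : Option String) (preferred_systems : Option (List String)) : String :=
  match codings with
  | [] => ""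
  | c0 :: _ =>
    let rank := pvRankAux (pvPrefs preferred_system preferred_systems) 0 PySem.Dict.empty
    match pvBest rank codings none with
    | some b => b.2
    | none => pvCgetD c0 "code" ""

def extract_coding_code_alt (codeable_concept : Option (List (String × List (List (String × String))))) (preferred_system : Option String) (preferred_systems : Option (List String)) : String :=
  match codeable_concept with
  | none => ""
  | some d =>
    if d.isEmpty then ""
    else pvBodyB ((PySem.Dict.mk d).getD "coding" []) preferred_system preferred_systems

-- ===== PRECONDITION & SPEC =====
def Spec_extract_coding_code (codeable_concept : Option (List (String × List (List (String × String))))) (preferred_system : Option String) (preferred_systems : Option (List String)) (out : String) : Prop := out = extract_coding_code_alt codeable_concept preferred_system preferred_systems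
instance (codeable_concept : Option (List (String × List (List (String × String))))) (preferred_system : Option String) (preferred_systems : Option (List String)) (out : String) : Decidable (Spec_extract_coding_code codeable_concept preferred_system preferred_systems out) := by unfold Spec_extract_coding_code; infer_instance

-- ===== CLAIM =====
def Claim_equal_extract_coding_code : Prop := ∀ (codeable_concept : Option (List (String × List (List (String × String))))) (preferred_system : Option String) (preferred_systems : Option (List String)), Dom_extract_coding_code codeable_concept preferred_system preferred_systems → Spec_extract_coding_code codeable_concept preferred_system preferred_systems (extract_coding_code codeable_concept preferred_system preferred_systems)

-- ===== LEMMAS AND PROOFS =====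

-- first index of k in the preference list
def pvFirstIdx? : List String → Option String → Option Nat
  | [], _ => none
  | s :: rest, k => if k = some s then some 0 else (pvFirstIdx? rest k).map (· + 1)

-- one update step of the selection pass
def pvStep (r : Option Nat) (code : String) (best : Option (Nat × String)) : Option (Nat × String) :=
  if code ≠ "" then
    match r with
    | some rv =>
      match best with
      | none => some (rv, code)
      | some b => if rv < b.1 then some (rv, code) else some b
    | none => best
  else best

-- generic selection pass (pvBest with the dict lookup abstracted to a function)
def pvSel (rk : Option String → Option Nat) : List (List (String × String)) → Option (Nat × String) → Option (Nat × String)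
  | [], best => best
  | c :: rest, best => pvSel rk rest (pvStep (rk (pvCget? c "system")) (pvCgetD c "code" "") best)

theorem pvStep_code_empty (r : Option Nat) (code : String) (best : Option (Nat × String)) (h : code = "") :
    pvStep r code best = best := by simp [pvStep, h]

theorem pvStep_rnone (code : String) (best : Option (Nat × String)) : pvStep none code best = best := by
  unfold pvStep; rw [ite_self]

theorem pvStep_some_none (rv : Nat) (code : String) (h : code ≠ "") :
    pvStep (some rv) code none = some (rv, code) := by unfold pvStep; rw [if_pos h]

theorem pvStep_some_some (rv : Nat) (code : String) (b : Nat × String) (h : code ≠ "") :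
    pvStep (some rv) code (some b) = if rv < b.1 then some (rv, code) else some b := by
  unfold pvStep; rw [if_pos h]

theorem pvBest_eq_sel (rank : PySem.Dict (Option String) Nat) (codings : List (List (String × String))) (best : Option (Nat × String)) :
    pvBest rank codings best = pvSel (fun k => rank.get? k) codings best := by
  induction codings generalizing best with
  | nil => rfl
  | cons c rest ih =>
    simp only [pvBest, pvSel, pvStep]
    by_cases hc : pvCgetD c "code" "" ≠ ""
    · simp only [if_pos hc]
      cases rank.get? (pvCget? c "system") with
      | none => exact ih _
      | some rv =>
        cases best with
        | none => exact ih _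
        | some b => by_cases hlt : rv < b.1 <;> simp only [hlt, if_true, if_false] <;> exact ih _
    · simp only [if_neg hc]; exact ih _

-- the rank dict computes the first index in prefs (offset by i)
theorem pvRankAux_get? (prefs : List String) (i : Nat) (d : PySem.Dict (Option String) Nat) (k : Option String) :
    (pvRankAux prefs i d).get? k =
      match d.get? k with
      | some v => some v
      | none => (pvFirstIdx? prefs k).map (· + i) := by
  induction prefs generalizing i d with
  | nil => simp only [pvRankAux, pvFirstIdx?]; cases d.get? k <;> rfl
  | cons s rest ih =>
    simp only [pvRankAux, pvFirstIdx?]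
    rw [ih]
    by_cases hk : k = some s
    · subst hk
      rw [PySem.Dict.get?_setdefault_self]
      cases h : d.get? (some s) with
      | some v => simp
      | none => simp
    · rw [PySem.Dict.get?_setdefault_of_ne _ _ hk]
      cases h : d.get? k with
      | some v => rfl
      | none =>
        simp only [if_neg hk]
        cases pvFirstIdx? rest k with
        | none => rfl
        | some n => simp [Option.map]; omega

theorem pvRank_get? (prefs : List String) (k : Option String) :
    (pvRankAux prefs 0 PySem.Dict.empty).get? k = pvFirstIdx? prefs k := by
  rw [pvRankAux_get?, PySem.Dict.get?_empty]
  cases pvFirstIdx? prefs k <;> simp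

-- selection only looks at ranks of codings with non-empty code
theorem pvSel_congr (rk1 rk2 : Option String → Option Nat) (codings : List (List (String × String))) (best : Option (Nat × String))
    (h : ∀ c ∈ codings, pvCgetD c "code" "" ≠ "" → rk1 (pvCget? c "system") = rk2 (pvCget? c "system")) :
    pvSel rk1 codings best = pvSel rk2 codings best := by
  induction codings generalizing best with
  | nil => rfl
  | cons c rest ih =>
    simp only [pvSel]
    by_cases hc : pvCgetD c "code" "" ≠ ""
    · rw [h c (List.mem_cons_self) hc]
      exact ih _ (fun c' hm => h c' (List.mem_cons_of_mem _ hm))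
    · simp only [not_not] at hc
      rw [pvStep_code_empty _ _ _ hc, pvStep_code_empty _ _ _ hc]
      exact ih _ (fun c' hm => h c' (List.mem_cons_of_mem _ hm))

-- with no acceptable system the pass keeps best unchanged
theorem pvSel_rnone (rk : Option String → Option Nat) (codings : List (List (String × String))) (best : Option (Nat × String))
    (h : ∀ k, rk k = none) : pvSel rk codings best = best := by
  induction codings generalizing best with
  | nil => rfl
  | cons c rest ih =>
    simp only [pvSel, h, pvStep_rnone]
    exact ih _

-- one shifted step
theorem pvStep_shift (r : Option Nat) (code : String) (best : Option (Nat × String)) :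
    pvStep (r.map (· + 1)) code (best.map (fun p => (p.1 + 1, p.2))) =
      (pvStep r code best).map (fun p => (p.1 + 1, p.2)) := by
  by_cases hc : code ≠ ""
  · cases r with
    | none => simp only [Option.map_none, pvStep_rnone]
    | some rv =>
      cases best with
      | none => simp only [Option.map_none, Option.map_some, pvStep_some_none _ _ hc]
      | some b =>
        simp only [Option.map_some, pvStep_some_some _ _ _ hc]
        by_cases hlt : rv < b.1
        · rw [if_pos hlt, if_pos (by omega : rv + 1 < (b.1 + 1, b.2).1)]; rfl
        · rw [if_neg hlt, if_neg (by omega : ¬ rv + 1 < (b.1 + 1, b.2).1)]; rfl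
  · simp only [not_not] at hc
    rw [pvStep_code_empty _ _ _ hc, pvStep_code_empty _ _ _ hc]

-- shifting all ranks by one commutes with the selection pass
theorem pvSel_shift (rk : Option String → Option Nat) (codings : List (List (String × String))) (best : Option (Nat × String)) :
    pvSel (fun k => (rk k).map (· + 1)) codings (best.map (fun p => (p.1 + 1, p.2))) =
      (pvSel rk codings best).map (fun p => (p.1 + 1, p.2)) := by
  induction codings generalizing best with
  | nil => rfl
  | cons c rest ih =>
    simp only [pvSel, pvStep_shift]
    exact ih _

-- a rank-0 best is final
theorem pvSel_zero_fixed (rk : Option String → Option Nat) (codings : List (List (String × String))) (w : String) :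
    pvSel rk codings (some (0, w)) = some (0, w) := by
  induction codings with
  | nil => rfl
  | cons c rest ih =>
    simp only [pvSel]
    by_cases hc : pvCgetD c "code" "" ≠ ""
    · cases rk (pvCget? c "system") with
      | none => rw [pvStep_rnone]; exact ih
      | some rv =>
        rw [pvStep_some_some _ _ _ hc, if_neg (by omega : ¬ rv < (0, w).1)]
        exact ih
    · simp only [not_not] at hc
      rw [pvStep_code_empty _ _ _ hc]; exact ih

-- if A's scan for the rank-0 system finds v, the selection pass returns (0, v)
theorem pvSel_scan_zero (rk : Option String → Option Nat) (s : String) (v : String)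
    (hk : ∀ k, rk k = some 0 ↔ k = some s) (codings : List (List (String × String))) (best : Option (Nat × String))
    (hb : ∀ b, best = some b → 1 ≤ b.1) (h : pvScanA s codings = some v) :
    pvSel rk codings best = some (0, v) := by
  induction codings generalizing best with
  | nil => simp [pvScanA] at h
  | cons c rest ih =>
    simp only [pvScanA] at h
    simp only [pvSel]
    by_cases hs : pvCget? c "system" = some s
    · rw [if_pos hs] at h
      by_cases hc : pvCgetD c "code" "" ≠ ""
      · rw [if_pos hc] at h
        have hv : pvCgetD c "code" "" = v := by injection h
        have hr0 : rk (pvCget? c "system") = some 0 := (hk _).2 hs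
        rw [hr0]
        cases best with
        | none => rw [pvStep_some_none _ _ hc, hv]; exact pvSel_zero_fixed rk rest v
        | some b =>
          have h1 := hb b rfl
          rw [pvStep_some_some _ _ _ hc, if_pos (by omega : 0 < b.1), hv]
          exact pvSel_zero_fixed rk rest v
      · rw [if_neg hc] at h
        simp only [not_not] at hc
        rw [pvStep_code_empty _ _ _ hc]
        exact ih _ hb h
    · rw [if_neg hs] at h
      by_cases hc : pvCgetD c "code" "" ≠ ""
      · cases hr : rk (pvCget? c "system") with
        | none => rw [pvStep_rnone]; exact ih _ hb h
        | some rv =>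
          have hrv : 1 ≤ rv := by
            rcases Nat.eq_zero_or_pos rv with h0 | h1
            · exact absurd ((hk _).1 (h0 ▸ hr)) hs
            · exact h1
          cases best with
          | none =>
            rw [pvStep_some_none _ _ hc]
            exact ih _ (fun b hb' => by obtain rfl := Option.some.inj hb'; exact hrv) h
          | some b =>
            rw [pvStep_some_some _ _ _ hc]
            by_cases hlt : rv < b.1
            · rw [if_pos hlt]; exact ih _ (fun b' hb' => by obtain rfl := Option.some.inj hb'; exact hrv) h
            · rw [if_neg hlt]; exact ih _ hb h
      · simp only [not_not] at hc
        rw [pvStep_code_empty _ _ _ hc]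
        exact ih _ hb h

-- a failed scan means no coding with that system has a non-empty code
theorem pvScanA_none (s : String) (codings : List (List (String × String))) (h : pvScanA s codings = none) :
    ∀ c ∈ codings, pvCget? c "system" = some s → pvCgetD c "code" "" = "" := by
  induction codings with
  | nil => intro c hm; simp at hm
  | cons c0 rest ih =>
    intro c hm hsys
    simp only [pvScanA] at h
    rcases List.mem_cons.1 hm with rfl | hm'
    · rw [if_pos hsys] at h
      by_cases hc : pvCgetD c "code" "" ≠ ""
      · rw [if_pos hc] at h; exact absurd h (by simp)
      · simpa using hc
    · by_cases hs0 : pvCget? c0 "system" = some s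
      · rw [if_pos hs0] at h
        by_cases hc0 : pvCgetD c0 "code" "" ≠ ""
        · rw [if_pos hc0] at h; exact absurd h (by simp)
        · rw [if_neg hc0] at h; exact ih h c hm' hsys
      · rw [if_neg hs0] at h; exact ih h c hm' hsys

-- MAIN: A's loop over a preference list equals B's min-selection pass
theorem pvLoopA_eq_sel (codings : List (List (String × String))) (prefs : List String) :
    pvLoopA codings prefs = (pvSel (pvFirstIdx? prefs) codings none).map Prod.snd := by
  induction prefs with
  | nil =>
    rw [pvSel_rnone (pvFirstIdx? []) codings none (fun k => rfl)]
    rfl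
  | cons s rest ih =>
    simp only [pvLoopA]
    cases h : pvScanA s codings with
    | some v =>
      rw [pvSel_scan_zero (pvFirstIdx? (s :: rest)) s v ?_ codings none (by rintro b ⟨⟩) h]
      · rfl
      · intro k
        simp only [pvFirstIdx?]
        by_cases hk : k = some s
        · simp [hk]
        · simp only [if_neg hk]
          cases pvFirstIdx? rest k <;> simp [Option.map, hk]
    | none =>
      have hcong : pvSel (pvFirstIdx? (s :: rest)) codings none =
          pvSel (fun k => (pvFirstIdx? rest k).map (· + 1)) codings none := by
        apply pvSel_congr
        intro c hm hc
        have hsys : pvCget? c "system" ≠ some s := by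
          intro hsy
          exact hc (pvScanA_none s codings h c hm hsy)
        simp [pvFirstIdx?, hsys]
      rw [hcong]
      have hshift := pvSel_shift (pvFirstIdx? rest) codings none
      simp only [Option.map_none] at hshift
      rw [hshift, ih]
      cases pvSel (pvFirstIdx? rest) codings none <;> rfl

-- A's loop splits over list append
theorem pvLoopA_append (codings : List (List (String × String))) (l1 l2 : List String) :
    pvLoopA codings (l1 ++ l2) =
      match pvLoopA codings l1 with
      | some c => some c
      | none => pvLoopA codings l2 := by
  induction l1 with
  | nil => rfl
  | cons s rest ih =>
    simp only [List.cons_append, pvLoopA, ih]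
    cases pvScanA s codings <;> rfl

theorem pvBodyB_char (c0 : List (String × String)) (cs : List (List (String × String))) (ps : Option String) (pss : Option (List String)) :
    pvBodyB (c0 :: cs) ps pss =
      match pvLoopA (c0 :: cs) (pvPrefs ps pss) with
      | some v => v
      | none => pvCgetD c0 "code" "" := by
  show (match pvBest (pvRankAux (pvPrefs ps pss) 0 PySem.Dict.empty) (c0 :: cs) none with
        | some b => b.2
        | none => pvCgetD c0 "code" "") = _
  rw [pvBest_eq_sel,
    pvSel_congr _ (pvFirstIdx? (pvPrefs ps pss)) _ _ (fun c _ _ => pvRank_get? _ _),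
    pvLoopA_eq_sel]
  cases pvSel (pvFirstIdx? (pvPrefs ps pss)) (c0 :: cs) none <;> rfl

theorem pvR1_char (cds : List (List (String × String))) (pss : Option (List String)) :
    (match pss with
      | some systems => if systems ≠ [] then pvLoopA cds systems else none
      | none => none) = pvLoopA cds (pss.getD []) := by
  cases pss with
  | none => rfl
  | some systems => cases systems <;> simp [pvLoopA]

theorem pvR2_char (cds : List (List (String × String))) (ps : Option String) :
    (match ps with
      | some s => if s ≠ "" then pvScanA s cds else none
      | none => none) = pvLoopA cds
        (match ps with | some s => if s ≠ "" then [s] else [] | none => []) := by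
  cases ps with
  | none => rfl
  | some s =>
    by_cases hs : s ≠ ""
    · simp only [if_pos hs, pvLoopA]
      cases pvScanA s cds <;> rfl
    · simp [if_neg hs, pvLoopA]

theorem pvBodyA_char (c0 : List (String × String)) (cs : List (List (String × String))) (ps : Option String) (pss : Option (List String)) :
    pvBodyA (c0 :: cs) ps pss =
      match pvLoopA (c0 :: cs) (pvPrefs ps pss) with
      | some v => v
      | none => pvCgetD c0 "code" "" := by
  show (match (match pss with
          | some systems => if systems ≠ [] then pvLoopA (c0 :: cs) systems else none
          | none => none) with
        | some code => code
        | none =>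
          match (match ps with
            | some s => if s ≠ "" then pvScanA s (c0 :: cs) else none
            | none => none) with
          | some code => code
          | none => if pvCgetD c0 "code" "" ≠ "" then pvCgetD c0 "code" "" else "") = _
  rw [pvR1_char, pvR2_char]
  unfold pvPrefs
  rw [pvLoopA_append]
  cases pvLoopA (c0 :: cs) (pss.getD []) with
  | some v => rfl
  | none =>
    cases pvLoopA (c0 :: cs)
      (match ps with | some s => if s ≠ "" then [s] else [] | none => []) with
    | some v => rfl
    | none =>
      by_cases hfc : pvCgetD c0 "code" "" ≠ ""
      · simp [hfc]
      · simp only [not_not] at hfc; simp [hfc]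

theorem pvBody_eq (codings : List (List (String × String))) (ps : Option String) (pss : Option (List String)) :
    pvBodyA codings ps pss = pvBodyB codings ps pss := by
  cases codings with
  | nil => rfl
  | cons c0 cs => rw [pvBodyA_char, pvBodyB_char]

-- ===== VERDICT =====
theorem extract_coding_code_spec : Claim_equal_extract_coding_code := by
  intro cc ps pss hdom
  clear hdom
  unfold Spec_extract_coding_code
  cases cc with
  | none => rfl
  | some d =>
    simp only [extract_coding_code, extract_coding_code_alt]
    by_cases hd : d.isEmpty
    · simp [hd]
    · simp [hd, pvBody_eq]
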